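-- pv_equiv track=rewrite | github.com/josephgruber/advent-of-code | legacy/solutions/y2018/solution_2018_2.py | invMgmtSystemPart1
-- ===== SOURCE A (Python) =====
-- from collections import Counter
--
-- def invMgmtSystemPart1(boxes):
--   boxCountA = 0
--   boxCountB = 0
--
--   for box in boxes.splitlines():
--     boxId = Counter(box.strip())
--     checksumBoxes = {x: boxId[x] for x in boxId if boxId[x] == 2 or boxId[x] == 3}
--
--     if 2 in checksumBoxes.values():
--       boxCountA += 1
--
--     if 3 in checksumBoxes.values():
--       boxCountB += 1
--
--   return boxCountA * boxCountB
-- ===== SOURCE B (Python) =====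
-- def invMgmtSystemPart1(boxes):
--   twos = 0
--   threes = 0
--   for line in boxes.splitlines():
--     has2 = False
--     has3 = False
--     run = 0
--     prev = None
--     for ch in sorted(line.strip()):
--       if ch == prev:
--         run += 1
--       else:
--         if run == 2:
--           has2 = True
--         if run == 3:
--           has3 = True
--         run = 1
--         prev = ch
--     if run == 2:
--       has2 = True
--     if run == 3:
--       has3 = True
--     if has2:
--       twos += 1
--     if has3:
--       threes += 1
--   return twos * threes
-- ===== Notes on version B (the rewrite author's own statement) =====
-- stated objective: alternative
-- what changed: Replaces the per-line Counter hash tabulation and dict-comprehension/.values() membership tests by sorting each stripped line's characters and scanning the runs of equal letters once, setting has2/has3 flags from the run lengths.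
import Mathlib
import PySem

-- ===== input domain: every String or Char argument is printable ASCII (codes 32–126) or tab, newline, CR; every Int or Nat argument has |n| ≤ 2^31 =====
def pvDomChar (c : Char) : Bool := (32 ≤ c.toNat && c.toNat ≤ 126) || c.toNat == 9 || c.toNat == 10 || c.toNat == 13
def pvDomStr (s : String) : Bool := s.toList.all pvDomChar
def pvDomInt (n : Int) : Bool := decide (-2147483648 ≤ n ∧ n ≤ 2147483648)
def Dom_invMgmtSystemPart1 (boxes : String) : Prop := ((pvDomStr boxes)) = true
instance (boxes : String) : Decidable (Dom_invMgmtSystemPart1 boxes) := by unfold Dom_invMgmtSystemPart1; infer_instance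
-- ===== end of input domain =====

set_option maxRecDepth 4000
set_option maxHeartbeats 1000000


-- B replaces the per-line Counter/dict-comprehension tabulation by sorting the line's
-- characters and scanning the runs of equal letters once (objective: alternative).

-- ===== PORT A =====
-- body of A's loop over boxes.splitlines(): Counter(box.strip()), the dict
-- comprehension keeping counts 2 or 3, and the two .values() membership tests
def pvAStep (st : Int × Int) (box : String) : Int × Int :=
  let boxId := PySem.Dict.counter (PySem.Str.strip box).toList
  let checksumBoxes := PySem.Dict.mk (boxId.items.filter (fun p => p.2 == 2 || p.2 == 3))
  let a := if (2 : Int) ∈ checksumBoxes.values then st.1 + 1 else st.1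
  let b := if (3 : Int) ∈ checksumBoxes.values then st.2 + 1 else st.2
  (a, b)

def invMgmtSystemPart1 (boxes : String) : Int :=
  let st := (PySem.Str.splitlines boxes).foldl pvAStep (0, 0)
  st.1 * st.2

-- ===== PORT B =====
-- one step of B's inner loop: state (has2, has3, run, prev)
def pvRunStep (st : Bool × Bool × Nat × Option Char) (ch : Char) : Bool × Bool × Nat × Option Char :=
  if some ch = st.2.2.2 then (st.1, st.2.1, st.2.2.1 + 1, st.2.2.2)
  else (st.1 || st.2.2.1 == 2, st.2.1 || st.2.2.1 == 3, 1, some ch)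

-- body of B's loop over boxes.splitlines(): sort the stripped line, scan its runs
def pvBStep (st : Int × Int) (line : String) : Int × Int :=
  let cs := PySem.List.sorted (PySem.Str.strip line).toList (fun c => c) false
  let r := cs.foldl pvRunStep (false, false, 0, none)
  let has2 := r.1 || r.2.2.1 == 2
  let has3 := r.2.1 || r.2.2.1 == 3
  (if has2 then st.1 + 1 else st.1, if has3 then st.2 + 1 else st.2)

def invMgmtSystemPart1_alt (boxes : String) : Int :=
  let st := (PySem.Str.splitlines boxes).foldl pvBStep (0, 0)
  st.1 * st.2

-- ===== PRECONDITION & SPEC =====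
def Spec_invMgmtSystemPart1 (boxes : String) (out : Int) : Prop := out = invMgmtSystemPart1_alt boxes
instance (boxes : String) (out : Int) : Decidable (Spec_invMgmtSystemPart1 boxes out) := by unfold Spec_invMgmtSystemPart1; infer_instance

-- ===== CLAIM (what is proved, stated in full; the proofs are below) =====
def Claim_equal_invMgmtSystemPart1 : Prop := ∀ (boxes : String), Dom_invMgmtSystemPart1 boxes → Spec_invMgmtSystemPart1 boxes (invMgmtSystemPart1 boxes)

-- ===== LEMMAS AND PROOFS =====

-- appending a fresh character: completed-run flags absorb the previous run
theorem pvFlag_fresh (p : List Char) (ch c' : Char) (k : Nat)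
    (hnot : ch ∉ p) (hc'mem : c' ∈ p) :
    (decide (∃ c ∈ p, c ≠ c' ∧ p.count c = k) || (p.count c' == k)) =
      decide (∃ c ∈ p ++ [ch], c ≠ ch ∧ (p ++ [ch]).count c = k) := by
  rw [Bool.eq_iff_iff]
  simp only [Bool.or_eq_true, decide_eq_true_eq, beq_iff_eq]
  constructor
  · rintro (⟨c, hc, hne2, h2⟩ | h2)
    · refine ⟨c, List.mem_append_left _ hc, ?_, ?_⟩
      · rintro rfl; exact hnot hc
      · have hcch : c ≠ ch := by rintro rfl; exact hnot hc
        have hz : List.count c [ch] = 0 := List.count_eq_zero.mpr (by simp [hcch])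
        simp [List.count_append, hz, h2]
    · refine ⟨c', List.mem_append_left _ hc'mem, ?_, ?_⟩
      · rintro rfl; exact hnot hc'mem
      · have hcch : c' ≠ ch := by rintro rfl; exact hnot hc'mem
        have hz : List.count c' [ch] = 0 := List.count_eq_zero.mpr (by simp [hcch])
        simp [List.count_append, hz, h2]
  · rintro ⟨c, hc, hne2, h2⟩
    have hcp : c ∈ p := by
      rcases List.mem_append.mp hc with h | h
      · exact h
      · simp at h; exact absurd h hne2
    have hz : List.count c [ch] = 0 := List.count_eq_zero.mpr (by simp; rintro rfl; exact hnot hcp)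
    have h2' : p.count c = k := by simpa [List.count_append, hz] using h2
    by_cases hcx : c = c'
    · subst hcx; exact Or.inr h2'
    · exact Or.inl ⟨c, hcp, hcx, h2'⟩

-- appending another copy of the last character leaves the completed-run flags unchanged
theorem pvFlag_same (p : List Char) (x : Char) (k : Nat) :
    decide (∃ c ∈ p, c ≠ x ∧ p.count c = k) =
      decide (∃ c ∈ p ++ [x], c ≠ x ∧ (p ++ [x]).count c = k) := by
  rw [Bool.eq_iff_iff]
  simp only [decide_eq_true_eq]
  constructor
  · rintro ⟨c, hc, hne2, h2⟩
    have hz : List.count c [x] = 0 := List.count_eq_zero.mpr (by simp [hne2])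
    exact ⟨c, List.mem_append_left _ hc, hne2, by simp [List.count_append, hz, h2]⟩
  · rintro ⟨c, hc, hne2, h2⟩
    have hcp : c ∈ p := by
      rcases List.mem_append.mp hc with h | h
      · exact h
      · simp at h; exact absurd h hne2
    have hz : List.count c [x] = 0 := List.count_eq_zero.mpr (by simp [hne2])
    exact ⟨c, hcp, hne2, by simpa [List.count_append, hz] using h2⟩

theorem pvRunStep_same (h2 h3 : Bool) (n : Nat) (ch : Char) :
    pvRunStep (h2, h3, n, some ch) ch = (h2, h3, n + 1, some ch) := by
  simp [pvRunStep]

theorem pvRunStep_new (h2 h3 : Bool) (n : Nat) (ch x : Char) (h : ch ≠ x) :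
    pvRunStep (h2, h3, n, some x) ch = (h2 || (n == 2), h3 || (n == 3), 1, some ch) := by
  simp [pvRunStep, h]

-- run-scan invariant over a sorted (Pairwise ≤) list: after the fold, prev is the last
-- element, run is its multiplicity, and the flags record counts of the earlier letters
theorem pvRunScan_inv (p : List Char) (x : Char) (hne : p ≠ [])
    (hx : p.getLast hne = x) (hs : p.Pairwise (· ≤ ·)) :
    p.foldl pvRunStep (false, false, 0, none) =
      (decide (∃ c ∈ p, c ≠ x ∧ p.count c = 2),
       decide (∃ c ∈ p, c ≠ x ∧ p.count c = 3),
       p.count x, some x) := by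
  induction p using List.reverseRecOn generalizing x with
  | nil => simp at hne
  | append_singleton q ch ih =>
    have hx' : ch = x := by simpa using hx
    subst hx'
    rcases q.eq_nil_or_concat' with rfl | ⟨q', c', rfl⟩
    · simp [pvRunStep]
    · set p := q' ++ [c'] with hp
      have hpne : p ≠ [] := by simp [hp]
      have hps : p.Pairwise (· ≤ ·) := (List.pairwise_append.mp hs).1
      have hle : ∀ c ∈ p, c ≤ ch := by
        intro c hc
        exact (List.pairwise_append.mp hs).2.2 c hc ch (by simp)
      have hlast : p.getLast hpne = c' := by simp [hp]
      have hc'mem : c' ∈ p := by simp [hp]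
      rw [List.foldl_append, ih c' hpne hlast hps]
      simp only [List.foldl_cons, List.foldl_nil]
      by_cases hcc : ch = c'
      · subst hcc
        rw [pvRunStep_same]
        refine congrArg₂ Prod.mk ?_ (congrArg₂ Prod.mk ?_ (congrArg₂ Prod.mk ?_ rfl))
        · exact pvFlag_same p ch 2
        · exact pvFlag_same p ch 3
        · simp [List.count_append]
      · have hnot : ch ∉ p := by
          intro hm
          have h1 : ch ≤ c' := by
            rcases List.mem_append.mp hm with h | h
            · exact (List.pairwise_append.mp (hp ▸ hps)).2.2 ch h c' (by simp)
            · simp at h; exact absurd h hcc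
          exact hcc (le_antisymm h1 (hle c' hc'mem))
        rw [pvRunStep_new _ _ _ _ _ hcc]
        refine congrArg₂ Prod.mk ?_ (congrArg₂ Prod.mk ?_ (congrArg₂ Prod.mk ?_ rfl))
        · exact pvFlag_fresh p ch c' 2 hnot hc'mem
        · exact pvFlag_fresh p ch c' 3 hnot hc'mem
        · simp [List.count_append, List.count_eq_zero.mpr hnot]

-- B's per-line flags on a sorted list decide "some letter occurs exactly k times"
theorem pvRunScan_flags (cs : List Char) (hs : cs.Pairwise (· ≤ ·)) :
    (((cs.foldl pvRunStep (false, false, 0, none)).1 ||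
        ((cs.foldl pvRunStep (false, false, 0, none)).2.2.1 == 2)) =
          decide (∃ c ∈ cs, cs.count c = 2)) ∧
    (((cs.foldl pvRunStep (false, false, 0, none)).2.1 ||
        ((cs.foldl pvRunStep (false, false, 0, none)).2.2.1 == 3)) =
          decide (∃ c ∈ cs, cs.count c = 3)) := by
  rcases eq_or_ne cs [] with rfl | hne
  · simp
  · have hx := pvRunScan_inv cs (cs.getLast hne) hne rfl hs
    have hmem : cs.getLast hne ∈ cs := List.getLast_mem hne
    rw [hx]
    constructor <;>
    · rw [Bool.eq_iff_iff]
      simp only [Bool.or_eq_true, decide_eq_true_eq, beq_iff_eq]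
      constructor
      · rintro (⟨c, hc, _, h2⟩ | h2)
        · exact ⟨c, hc, h2⟩
        · exact ⟨cs.getLast hne, hmem, h2⟩
      · rintro ⟨c, hc, h2⟩
        by_cases hcx : c = cs.getLast hne
        · subst hcx; exact Or.inr h2
        · exact Or.inl ⟨c, hc, hcx, h2⟩

-- A's values-membership test decides the same proposition on the raw character list
theorem pvAcond (l : List Char) (kI : Int) (k : Nat) (hcast : kI = (k : Int)) (hk : k = 2 ∨ k = 3) :
    (kI ∈ (PySem.Dict.mk ((PySem.Dict.counter l).items.filter
        (fun p => p.2 == 2 || p.2 == 3))).values) ↔ ∃ c ∈ l, l.count c = k := by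
  subst hcast
  simp [PySem.Dict.values, PySem.Dict.items_counter, List.mem_filter, PySem.Set.mem_ofList]
  rcases hk with rfl | rfl <;> simp

-- the two per-line loop bodies agree
theorem pvStep_eq (st : Int × Int) (line : String) : pvAStep st line = pvBStep st line := by
  unfold pvAStep pvBStep
  set l := (PySem.Str.strip line).toList with hl
  set cs := PySem.List.sorted l (fun c => c) false with hcs
  have hperm : cs.Perm l := PySem.List.sorted_perm l (fun c => c) false
  have hpw : cs.Pairwise (· ≤ ·) := PySem.List.sorted_pairwise l (fun c => c)
  have hfl := pvRunScan_flags cs hpw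
  have h2 : ((2 : Int) ∈ (PySem.Dict.mk ((PySem.Dict.counter l).items.filter
      (fun p => p.2 == 2 || p.2 == 3))).values) ↔
      (((cs.foldl pvRunStep (false, false, 0, none)).1 ||
        ((cs.foldl pvRunStep (false, false, 0, none)).2.2.1 == 2)) = true) := by
    rw [hfl.1, pvAcond l 2 2 (by norm_num) (Or.inl rfl)]
    simp only [decide_eq_true_eq]
    exact ⟨fun ⟨c, hc, h⟩ => ⟨c, hperm.mem_iff.mpr hc, by rw [hperm.count_eq]; exact h⟩,
           fun ⟨c, hc, h⟩ => ⟨c, hperm.mem_iff.mp hc, by rw [← hperm.count_eq]; exact h⟩⟩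
  have h3 : ((3 : Int) ∈ (PySem.Dict.mk ((PySem.Dict.counter l).items.filter
      (fun p => p.2 == 2 || p.2 == 3))).values) ↔
      (((cs.foldl pvRunStep (false, false, 0, none)).2.1 ||
        ((cs.foldl pvRunStep (false, false, 0, none)).2.2.1 == 3)) = true) := by
    rw [hfl.2, pvAcond l 3 3 (by norm_num) (Or.inr rfl)]
    simp only [decide_eq_true_eq]
    exact ⟨fun ⟨c, hc, h⟩ => ⟨c, hperm.mem_iff.mpr hc, by rw [hperm.count_eq]; exact h⟩,
           fun ⟨c, hc, h⟩ => ⟨c, hperm.mem_iff.mp hc, by rw [← hperm.count_eq]; exact h⟩⟩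
  simp only [h2, h3]

theorem pvFoldl_step_eq (L : List String) (st : Int × Int) :
    L.foldl pvAStep st = L.foldl pvBStep st := by
  induction L generalizing st with
  | nil => simp only [List.foldl_nil]
  | cons x xs ih => simp only [List.foldl_cons, pvStep_eq]; exact ih _

theorem invMgmtSystemPart1_spec : Claim_equal_invMgmtSystemPart1 := by
  intro boxes _
  unfold Spec_invMgmtSystemPart1 invMgmtSystemPart1 invMgmtSystemPart1_alt
  rw [pvFoldl_step_eq]
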